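-- pv_equiv track=rewrite | github.com/wooshikwon/modern-deeplearning-pipeline | mdp/cli/generate.py | _resolve_pretrained_tokenizer_name
-- ===== SOURCE A (Python) =====
-- def _resolve_pretrained_tokenizer_name(pretrained_uri: str) -> str:
--     """pretrained URI에서 토크나이저 이름을 추론한다.
--
--     hf:// 접두사가 있으면 제거하고 HuggingFace 모델 이름을 반환한다.
--     접두사가 없으면 HF 모델명으로 간주한다.
--     """
--     if pretrained_uri.startswith("hf://"):
--         return pretrained_uri[5:]
--     for prefix in ("timm://", "ultralytics://", "local://"):
--         if pretrained_uri.startswith(prefix):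
--             raise ValueError(
--                 f"{prefix} 모델의 토크나이저는 자동 추론할 수 없습니다. "
--                 "--tokenizer로 명시해 주세요."
--             )
--     return pretrained_uri
-- ===== SOURCE B (Python) =====
-- def _resolve_pretrained_tokenizer_name(pretrained_uri: str) -> str:
--     """Parse the scheme once and dispatch, instead of repeated prefix scans."""
--     i = pretrained_uri.find("://")
--     if i == -1:
--         return pretrained_uri
--     scheme = pretrained_uri[:i]
--     if scheme == "hf":
--         return pretrained_uri[i + 3:]
--     if scheme in {"timm", "ultralytics", "local"}:
--         raise ValueError(
--             f"{scheme}:// 모델의 토크나이저는 자동 추론할 수 없습니다. "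
--             "--tokenizer로 명시해 주세요."
--         )
--     return pretrained_uri
-- ===== Notes on version B (the rewrite author's own statement) =====
-- stated objective: idiomatic
-- what changed: B locates the scheme separator once with str.find, extracts the scheme and dispatches on it via set membership, instead of A's sequence of four startswith prefix scans.
import Mathlib
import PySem

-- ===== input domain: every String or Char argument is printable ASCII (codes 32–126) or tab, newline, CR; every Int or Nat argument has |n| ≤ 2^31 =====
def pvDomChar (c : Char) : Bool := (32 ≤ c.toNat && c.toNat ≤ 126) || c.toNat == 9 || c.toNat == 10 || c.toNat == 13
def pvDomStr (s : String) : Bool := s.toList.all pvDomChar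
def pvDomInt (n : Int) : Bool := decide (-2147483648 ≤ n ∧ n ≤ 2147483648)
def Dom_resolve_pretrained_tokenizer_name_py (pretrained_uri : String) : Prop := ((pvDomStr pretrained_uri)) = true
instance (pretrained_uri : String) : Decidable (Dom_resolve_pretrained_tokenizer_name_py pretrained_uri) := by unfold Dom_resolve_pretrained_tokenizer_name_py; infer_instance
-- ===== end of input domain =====

-- B parses the URI scheme once (find "://" + dispatch on the scheme) instead of A's
-- sequence of startswith prefix scans; idiomatic decomposition, same cost.


-- ===== PORT A =====
def resolve_pretrained_tokenizer_name_py (pretrained_uri : String) : String :=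
  if PySem.Str.startswith pretrained_uri "hf://" then
    String.ofList (PySem.List.slice pretrained_uri.toList (some 5) none)
  else if ["timm://", "ultralytics://", "local://"].any
      (fun p => PySem.Str.startswith pretrained_uri p) then
    pretrained_uri  -- Python raises ValueError here; these inputs are excluded by Pre_
  else
    pretrained_uri

-- ===== PORT B =====
def resolve_pretrained_tokenizer_name_py_alt (pretrained_uri : String) : String :=
  let i := PySem.Str.find pretrained_uri "://"
  if i = -1 then pretrained_uri
  else
    let scheme := PySem.List.slice pretrained_uri.toList none (some i)
    if scheme = "hf".toList then
      String.ofList (PySem.List.slice pretrained_uri.toList (some (i + 3)) none)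
    else if scheme = "timm".toList ∨ scheme = "ultralytics".toList ∨ scheme = "local".toList then
      pretrained_uri  -- Python raises ValueError here; these inputs are excluded by Pre_
    else
      pretrained_uri

-- ===== PRECONDITION & SPEC =====
-- Pre_ excludes exactly the inputs on which A raises ValueError (timm://, ultralytics://, local:// prefixes).
def Pre_resolve_pretrained_tokenizer_name_py (pretrained_uri : String) : Prop :=
  PySem.Str.startswith pretrained_uri "timm://" = false ∧
  PySem.Str.startswith pretrained_uri "ultralytics://" = false ∧
  PySem.Str.startswith pretrained_uri "local://" = false
instance (pretrained_uri : String) : Decidable (Pre_resolve_pretrained_tokenizer_name_py pretrained_uri) := by unfold Pre_resolve_pretrained_tokenizer_name_py; infer_instance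
def pvWitness_resolve_pretrained_tokenizer_name_py : String := "hf://bert-base-uncased"

def Spec_resolve_pretrained_tokenizer_name_py (pretrained_uri : String) (out : String) : Prop := out = resolve_pretrained_tokenizer_name_py_alt pretrained_uri
instance (pretrained_uri : String) (out : String) : Decidable (Spec_resolve_pretrained_tokenizer_name_py pretrained_uri out) := by unfold Spec_resolve_pretrained_tokenizer_name_py; infer_instance

-- ===== CLAIM (what is proved, stated in full; the proofs are below) =====
def Claim_equal_resolve_pretrained_tokenizer_name_py : Prop := ∀ (pretrained_uri : String), Dom_resolve_pretrained_tokenizer_name_py pretrained_uri → Pre_resolve_pretrained_tokenizer_name_py pretrained_uri → Spec_resolve_pretrained_tokenizer_name_py pretrained_uri (resolve_pretrained_tokenizer_name_py pretrained_uri)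

-- ===== LEMMAS AND PROOFS =====

-- find points at k when the pattern matches at k and at no earlier index.
lemma find_eq_of (l sub : List Char) (k : Nat)
    (h1 : sub <+: l.drop k) (h2 : ∀ i, i < k → ¬ sub <+: l.drop i) :
    PySem.Chars.find l sub = (k : Int) := by
  have hin : sub <:+: l := h1.isInfix.trans (List.drop_suffix k l).isInfix
  have hnn : 0 ≤ PySem.Chars.find l sub := (PySem.Chars.find_nonneg_iff l sub).mpr hin
  obtain ⟨hp, hmin⟩ := PySem.Chars.find_spec hnn
  rcases lt_trichotomy (PySem.Chars.find l sub).toNat k with h | h | h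
  · exact absurd hp (h2 _ h)
  · omega
  · exact absurd h1 (hmin k h)

-- if the scheme part contains no ':', find locates "://" right after it
lemma find_scheme (S r : List Char) (hS : ∀ c ∈ S, c ≠ ':') :
    PySem.Chars.find (S ++ [':', '/', '/'] ++ r) [':', '/', '/'] = (S.length : Int) := by
  apply find_eq_of
  · rw [List.append_assoc, List.drop_left]
    exact ⟨r, rfl⟩
  · intro i hi hpre
    obtain ⟨t, ht⟩ := hpre
    have hq : (S ++ [':', '/', '/'] ++ r)[i]? = some ':' := by
      rw [← List.head?_drop, ← ht]; rfl
    rw [List.append_assoc, List.getElem?_append_left hi, List.getElem?_eq_getElem hi] at hq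
    exact hS _ (List.getElem_mem hi) (by injection hq)

-- a named prefix followed by "://" forces A's startswith test for that prefix
lemma pref_of_take (l S t : List Char) (f : Int)
    (htake : l.take f.toNat = S) (hdrop : l.drop f.toNat = [':', '/', '/'] ++ t) :
    (S ++ [':', '/', '/']) <+: l := by
  refine ⟨t, ?_⟩
  rw [List.append_assoc, ← htake, ← hdrop, List.take_append_drop]

-- ===== VERDICT (by name: the statement is the Claim_ definition above) =====
theorem resolve_pretrained_tokenizer_name_py_spec : Claim_equal_resolve_pretrained_tokenizer_name_py := by
  intro s _ hpre
  unfold Spec_resolve_pretrained_tokenizer_name_py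
  obtain ⟨h1, h2, h3⟩ := hpre
  have hfeq : PySem.Str.find s "://" = PySem.Chars.find s.toList [':', '/', '/'] :=
    PySem.Str.find_eq s "://"
  by_cases hhf : PySem.Str.startswith s "hf://" = true
  · -- s starts with "hf://": both return s[5:]
    have hpl : "hf://".toList <+: s.toList := by
      rw [PySem.Str.startswith_eq] at hhf
      exact (PySem.Chars.startswith_iff _ _).mp hhf
    obtain ⟨r, hr⟩ := hpl
    have hl : s.toList = ['h', 'f'] ++ [':', '/', '/'] ++ r := by rw [← hr]; rfl
    have hfind : PySem.Str.find s "://" = 2 := by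
      rw [hfeq, hl]
      refine find_scheme ['h', 'f'] r ?_
      intro c hc
      simp only [List.mem_cons, List.not_mem_nil, or_false] at hc
      rcases hc with rfl | rfl <;> decide
    have hsch : PySem.List.slice s.toList none (some (2 : Int)) = "hf".toList := by
      rw [PySem.List.slice_to s.toList (by norm_num), hl]
      rfl
    rw [resolve_pretrained_tokenizer_name_py, if_pos hhf]
    rw [resolve_pretrained_tokenizer_name_py_alt]
    simp only [hfind]
    rw [if_neg (by norm_num : ¬ ((2 : Int)) = -1), hsch, if_pos rfl]
    norm_num
  · -- no "hf://" prefix: A returns s, and B's scheme (if any) is none of the named ones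
    have hhf' : PySem.Str.startswith s "hf://" = false := by simpa using hhf
    have hany : (["timm://", "ultralytics://", "local://"].any
        (fun p => PySem.Str.startswith s p)) = false := by
      simp only [List.any_cons, List.any_nil, h1, h2, h3, Bool.or_self]
    have hA : resolve_pretrained_tokenizer_name_py s = s := by
      rw [resolve_pretrained_tokenizer_name_py, if_neg hhf, if_neg (by rw [hany]; simp)]
    rw [hA, resolve_pretrained_tokenizer_name_py_alt]
    by_cases hfind : PySem.Str.find s "://" = -1
    · rw [if_pos hfind]
    · rw [if_neg hfind]
      have hnn : 0 ≤ PySem.Str.find s "://" := by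
        have := PySem.Chars.neg_one_le_find s.toList [':', '/', '/']
        rw [hfeq] at hfind ⊢
        omega
      obtain ⟨hp, -⟩ := PySem.Chars.find_spec (hfeq ▸ hnn)
      obtain ⟨t, ht⟩ := hp
      have hdrop : s.toList.drop (PySem.Str.find s "://").toNat = [':', '/', '/'] ++ t := by
        rw [hfeq]; exact ht.symm
      have hslice : PySem.List.slice s.toList none (some (PySem.Str.find s "://"))
          = s.toList.take (PySem.Str.find s "://").toNat :=
        PySem.List.slice_to s.toList hnn
      have hnot : ∀ (S : List Char) (p : String), p.toList = S ++ [':', '/', '/'] →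
          PySem.Str.startswith s p = false →
          ¬ s.toList.take (PySem.Str.find s "://").toNat = S := by
        intro S p hpS hsw htake
        have hpref : (S ++ [':', '/', '/']) <+: s.toList :=
          pref_of_take _ _ _ _ htake hdrop
        have : PySem.Chars.startswith s.toList p.toList = true := by
          rw [hpS]
          exact (PySem.Chars.startswith_iff _ _).mpr hpref
        rw [← PySem.Str.startswith_eq, hsw] at this
        exact Bool.false_ne_true this
      rw [hslice]
      rw [if_neg (hnot "hf".toList "hf://" rfl hhf')]
      rw [if_neg ?_]
      push Not
      exact ⟨hnot "timm".toList "timm://" rfl h1,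
             hnot "ultralytics".toList "ultralytics://" rfl h2,
             hnot "local".toList "local://" rfl h3⟩
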